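-- pv_equiv track=rewrite | github.com/charliegreen/poeteer | create_database.py | get_last_syll
-- ===== SOURCE A (Python) =====
-- def get_last_syll(p):
--     lastSyll = ''
--     for s in p.split(' '):
--         for c in s:
--             if c.isdigit():
--                 lastSyll = s[:-1]
--                 break
--             else:
--                 lastSyll += c
--     return lastSyll
-- ===== SOURCE B (Python) =====
-- def get_last_syll(p):
--     suffix = ''
--     for t in reversed(p.split(' ')):
--         if any(c.isdigit() for c in t):
--             return t[:-1] + suffix
--         suffix = t + suffix
--     return suffix
-- ===== Notes on version B (the rewrite author's own statement) =====
-- stated objective: alternative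
-- what changed: Instead of scanning every character left-to-right with a resettable string accumulator, B splits on the single-space separator and scans the tokens from the RIGHT, returning last-digit-token[:-1] plus the already-collected suffix at the first digit-containing token, so everything before that token is never touched.
import Mathlib
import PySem

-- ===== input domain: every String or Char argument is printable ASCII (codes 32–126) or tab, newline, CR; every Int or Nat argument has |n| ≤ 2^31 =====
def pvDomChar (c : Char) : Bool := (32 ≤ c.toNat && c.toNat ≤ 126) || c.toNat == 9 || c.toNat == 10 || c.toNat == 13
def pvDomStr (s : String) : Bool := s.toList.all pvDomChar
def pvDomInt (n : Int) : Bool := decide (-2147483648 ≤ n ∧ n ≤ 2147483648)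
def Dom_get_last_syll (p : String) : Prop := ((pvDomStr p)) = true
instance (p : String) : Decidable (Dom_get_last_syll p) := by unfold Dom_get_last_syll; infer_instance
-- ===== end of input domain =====

-- One honest line: B scans the space-split tokens from the right and stops at the first digit-containing token; alternative decomposition, same cost.
-- ===== PORT A =====
-- inner loop over the chars of token `orig` (Python: for c in s: ... break), acc = lastSyll
def pvInnerA (orig : List Char) : List Char → List Char → List Char
  | [], acc => acc
  | c :: cs, acc =>
      if PySem.Chars.isdigit c then PySem.Chars.slice orig none (some (-1))  -- s[:-1]
      else pvInnerA orig cs (acc ++ [c])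

-- outer loop over p.split(' ')
def pvOuterA : List (List Char) → List Char → List Char
  | [], acc => acc
  | s :: ss, acc => pvOuterA ss (pvInnerA s s acc)

def get_last_syll (p : String) : String :=
  String.ofList (pvOuterA (PySem.Chars.splitOn p.toList [' ']) [])

-- ===== PORT B =====
-- loop over reversed(tokens) with suffix accumulator; early return on a digit-containing token
def pvRevB : List (List Char) → List Char → List Char
  | [], suffix => suffix
  | t :: ts, suffix =>
      if t.any PySem.Chars.isdigit then PySem.Chars.slice t none (some (-1)) ++ suffix  -- t[:-1] + suffix
      else pvRevB ts (t ++ suffix)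

def get_last_syll_alt (p : String) : String :=
  String.ofList (pvRevB (PySem.Chars.splitOn p.toList [' ']).reverse [])

-- ===== PRECONDITION & SPEC =====
def Spec_get_last_syll (p : String) (out : String) : Prop := out = get_last_syll_alt p
instance (p : String) (out : String) : Decidable (Spec_get_last_syll p out) := by unfold Spec_get_last_syll; infer_instance

-- ===== CLAIM (what is proved, stated in full; the proofs are below) =====
def Claim_equal_get_last_syll : Prop := ∀ (p : String), Dom_get_last_syll p → Spec_get_last_syll p (get_last_syll p)

-- ===== LEMMAS AND PROOFS =====

-- A's inner char loop: a digit-containing token yields orig[:-1], otherwise acc ++ token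
lemma pvInnerA_eq (orig : List Char) : ∀ (cs acc : List Char),
    pvInnerA orig cs acc =
      if cs.any PySem.Chars.isdigit then orig.dropLast else acc ++ cs
  | [], acc => by simp [pvInnerA]
  | c :: cs, acc => by
      by_cases h : PySem.Chars.isdigit c = true
      · simp [pvInnerA, h, PySem.Chars.slice_eq_listSlice, PySem.List.slice_to_neg_one]
      · simp only [Bool.not_eq_true] at h
        simp only [pvInnerA, h, Bool.false_eq_true, if_false,
          pvInnerA_eq orig cs (acc ++ [c]), List.any_cons, Bool.false_or,
          List.append_assoc, List.singleton_append]

-- B's loop on a list with no digit-containing token just flattens it in reverse onto the suffix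
lemma pvRevB_no_digit : ∀ (xs : List (List Char)), xs.any (·.any PySem.Chars.isdigit) = false →
    ∀ (s : List Char), pvRevB xs s = xs.reverse.flatten ++ s
  | [], _, s => by simp [pvRevB]
  | t :: ts, h, s => by
      simp only [List.any_cons, Bool.or_eq_false_iff] at h
      simp [pvRevB, h.1, pvRevB_no_digit ts h.2, List.flatten_append]

-- B's loop is compositional across an append
lemma pvRevB_append : ∀ (xs ys : List (List Char)) (s : List Char),
    pvRevB (xs ++ ys) s =
      if xs.any (·.any PySem.Chars.isdigit) then pvRevB xs s
      else pvRevB ys (xs.reverse.flatten ++ s)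
  | [], ys, s => by simp [pvRevB]
  | x :: xs, ys, s => by
      by_cases h : x.any PySem.Chars.isdigit = true
      · simp [pvRevB, h]
      · simp only [Bool.not_eq_true] at h
        simp only [List.cons_append, pvRevB, h, Bool.false_eq_true, if_false,
          pvRevB_append xs ys (x ++ s), List.any_cons, Bool.false_or, List.reverse_cons,
          List.flatten_append, List.flatten_cons, List.flatten_nil, List.append_nil,
          List.append_assoc]

-- main invariant: A's outer loop equals B's right-to-left scan (of the reversed tokens)
lemma pvOuterA_eq : ∀ (ts : List (List Char)) (acc : List Char),
    pvOuterA ts acc =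
      if ts.any (·.any PySem.Chars.isdigit) then pvRevB ts.reverse [] else acc ++ ts.flatten
  | [], acc => by simp [pvOuterA]
  | t :: ts, acc => by
      have hrev : pvRevB (ts.reverse ++ [t]) [] =
          if ts.any (·.any PySem.Chars.isdigit) then pvRevB ts.reverse []
          else pvRevB [t] ts.flatten := by
        rw [pvRevB_append ts.reverse [t] []]
        simp
      rw [pvOuterA, pvOuterA_eq ts (pvInnerA t t acc), pvInnerA_eq t t acc]
      by_cases hts : ts.any (·.any PySem.Chars.isdigit) = true
      · simp only [List.any_cons, hts, Bool.or_true, if_true, List.reverse_cons, hrev]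

      · simp only [Bool.not_eq_true] at hts
        by_cases ht : t.any PySem.Chars.isdigit = true
        · simp only [List.any_cons, hts, ht, Bool.or_false, if_true,
            List.reverse_cons, hrev, Bool.false_eq_true, if_false, pvRevB,
            PySem.Chars.slice_eq_listSlice, PySem.List.slice_to_neg_one]
        · simp only [Bool.not_eq_true] at ht
          simp [hts, ht, List.append_assoc]

-- ===== VERDICT (by name: the statement is the Claim_ definition above) =====
theorem get_last_syll_spec : Claim_equal_get_last_syll := by
  intro p _
  unfold Spec_get_last_syll get_last_syll get_last_syll_alt
  rw [pvOuterA_eq]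
  by_cases h : (PySem.Chars.splitOn p.toList [' ']).any (·.any PySem.Chars.isdigit) = true
  · simp [h]
  · simp only [Bool.not_eq_true] at h
    rw [pvRevB_no_digit _ (by simpa using h)]
    simp [h]
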